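-- pv_equiv track=rewrite | github.com/biface/i18n | src/i18n_tools/loaders/handler.py | check_json_integrity
-- ===== SOURCE A (Python) =====
-- from typing import Any, Dict, List, Union
--
-- def check_json_integrity(data: Dict[str, Any]) -> bool:
--     """
--     Check the integrity of the JSON locale data.
--
--     :param data: The JSON locale data.
--     :type data: dict
--     :return: True if the data is valid, False otherwise.
--     :rtype: bool
--     """
--
--     for key, value in data.items():
--         if key != ".i18n_tools":
--             if not isinstance(value, list):
--                 return False
--
--             # Check that each item in the list is a list
--             if not all(isinstance(item, list) for item in value):
--                 return False
--
--             # Check that there is at least one non-empty list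
--             if not any(len(item) > 0 for item in value):
--                 return False
--
--             # Check that all lists have the same length
--             lengths = [len(item) for item in value]
--             if len(set(lengths)) != 1:
--                 return False
--     return True
-- ===== SOURCE B (Python) =====
-- def check_json_integrity(data):
--     """
--     Check the integrity of the JSON locale data.
--
--     Single pass per value: instead of three separate scans (all isinstance,
--     any non-empty, set of lengths), one loop maintains the expected length
--     (from the first item) and a saw_nonempty flag.
--     """
--     for key, value in data.items():
--         if key == ".i18n_tools":
--             continue
--         if not isinstance(value, list):
--             return False
--         expected = None
--         saw_nonempty = False
--         for item in value:
--             if not isinstance(item, list):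
--                 return False
--             if expected is None:
--                 expected = len(item)
--             elif len(item) != expected:
--                 return False
--             if len(item) > 0:
--                 saw_nonempty = True
--         if expected is None or not saw_nonempty:
--             return False
--     return True
-- ===== Notes on version B (the rewrite author's own statement) =====
-- stated objective: faster
-- what changed: Replaces the three separate scans per value (all-isinstance, any-nonempty, build-lengths-list-then-set) by one fused pass maintaining an expected length and a saw_nonempty flag.
import Mathlib
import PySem

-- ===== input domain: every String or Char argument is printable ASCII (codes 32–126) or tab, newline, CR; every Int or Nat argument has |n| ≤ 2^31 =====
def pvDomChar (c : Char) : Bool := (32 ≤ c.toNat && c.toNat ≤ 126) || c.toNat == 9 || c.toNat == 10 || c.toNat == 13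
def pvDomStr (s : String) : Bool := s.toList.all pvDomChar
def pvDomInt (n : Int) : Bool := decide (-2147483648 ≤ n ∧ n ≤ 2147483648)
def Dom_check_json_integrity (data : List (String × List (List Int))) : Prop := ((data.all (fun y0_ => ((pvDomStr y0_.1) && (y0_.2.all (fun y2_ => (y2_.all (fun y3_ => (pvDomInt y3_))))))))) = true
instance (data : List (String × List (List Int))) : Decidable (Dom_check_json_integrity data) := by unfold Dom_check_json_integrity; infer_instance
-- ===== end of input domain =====

-- B fuses A's three scans per value into one pass; the agreement is proved on the typed domain,
-- where Python's isinstance checks are identically true.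

-- ===== PORT A =====
-- literal port of A; `isinstance(value, list)` and the `all(isinstance(item, list) ...)` scan are
-- identically true in the typed domain and transliterate to the trivial scan kept below
def check_json_integrity : List (String × List (List Int)) → Bool
  | [] => true
  | (key, value) :: rest =>
    if key ≠ ".i18n_tools" then
      -- `if not all(isinstance(item, list) for item in value): return False`
      if ¬ (value.all (fun _item => true)) then false
      -- `if not any(len(item) > 0 for item in value): return False`
      else if ¬ (value.any (fun item => decide (item.length > 0))) then false
      -- `lengths = [len(item) for item in value]; if len(set(lengths)) != 1: return False`
      else if (PySem.Set.ofList (value.map (fun item => item.length))).length ≠ 1 then false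
      else check_json_integrity rest
    else check_json_integrity rest

-- ===== PORT B =====
-- one pass over the items of a value: expected length (from the first item) and a saw_nonempty flag
def altLoop : List (List Int) → Option Nat → Bool → Bool
  | [], expected, saw => expected.isSome && saw
  | item :: rest, expected, saw =>
    match expected with
    | none => altLoop rest (some item.length) (saw || decide (item.length > 0))
    | some e =>
      if item.length ≠ e then false
      else altLoop rest (some e) (saw || decide (item.length > 0))

def check_json_integrity_alt : List (String × List (List Int)) → Bool
  | [] => true
  | (key, value) :: rest =>
    if key == ".i18n_tools" then check_json_integrity_alt rest
    else if altLoop value none false then check_json_integrity_alt rest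
    else false

-- ===== PRECONDITION & SPEC =====
def Spec_check_json_integrity (data : List (String × List (List Int))) (out : Bool) : Prop := out = check_json_integrity_alt data
instance (data : List (String × List (List Int))) (out : Bool) : Decidable (Spec_check_json_integrity data out) := by unfold Spec_check_json_integrity; infer_instance

-- ===== CLAIM (what is proved, stated in full; the proofs are below) =====
def Claim_equal_check_json_integrity : Prop := ∀ (data : List (String × List (List Int))), Dom_check_json_integrity data → Spec_check_json_integrity data (check_json_integrity data)

-- ===== LEMMAS AND PROOFS =====

-- the tail of B's loop, once the expected length is fixed, is "all lengths equal e" and "saw, or some item non-empty"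
lemma altLoop_some (t : List (List Int)) : ∀ (e : Nat) (saw : Bool),
    altLoop t (some e) saw
      = ((t.all (fun x => x.length == e)) && (saw || t.any (fun x => decide (x.length > 0)))) := by
  induction t with
  | nil => intro e saw; simp [altLoop]
  | cons x r ih =>
    intro e saw
    by_cases hx : x.length = e
    · simp [altLoop, hx, ih, Bool.or_assoc]
    · simp [altLoop, hx]

-- A's `len(set(lengths)) == 1` test on a non-empty list says: every length equals the first
lemma set_len_one (a : Nat) (l : List Nat) :
    ((PySem.Set.ofList (a :: l)).length = 1) ↔ (l.all (fun x => x == a)) = true := by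
  constructor
  · intro h
    rcases List.length_eq_one_iff.mp h with ⟨x, hx⟩
    have ha : a ∈ PySem.Set.ofList (a :: l) := by
      rw [PySem.Set.mem_ofList]; exact List.mem_cons_self
    rw [hx] at ha
    simp at ha
    subst ha
    rw [List.all_eq_true]
    intro b hb
    have hbmem : b ∈ PySem.Set.ofList (a :: l) := by
      rw [PySem.Set.mem_ofList]; exact List.mem_cons_of_mem _ hb
    rw [hx] at hbmem
    simpa using hbmem
  · intro h
    have : PySem.Set.ofList (a :: l) = [a] := by
      rw [List.all_eq_true] at h
      show List.foldl PySem.Set.add [] (a :: l) = [a]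
      simp only [List.foldl_cons]
      have hbase : PySem.Set.add ([] : PySem.Set Nat) a = [a] := by rfl
      rw [hbase]
      clear hbase
      induction l with
      | nil => rfl
      | cons b r ih =>
        have hb : (b == a) = true := h b List.mem_cons_self
        have hba : b = a := by simpa using hb
        subst hba
        simp only [List.foldl_cons]
        have : PySem.Set.add [b] b = [b] := by simp [PySem.Set.add, PySem.Set.contains]
        rw [this]
        exact ih (fun c hc => h c (List.mem_cons_of_mem _ hc))
    rw [this]
    rfl

-- per value: A's three scans equal B's fused loop
lemma value_eq (value : List (List Int)) :
    ((value.any (fun item => decide (item.length > 0)))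
      && decide ((PySem.Set.ofList (value.map (fun item => item.length))).length = 1))
      = altLoop value none false := by
  cases value with
  | nil => rfl
  | cons h t =>
    show _ = altLoop t (some h.length) (false || decide (h.length > 0))
    rw [altLoop_some]
    simp only [List.map_cons]
    by_cases hall : (t.all (fun x => x.length == h.length)) = true
    · have hset : ((PySem.Set.ofList (h.length :: t.map (fun item => item.length))).length = 1) := by
        rw [set_len_one]
        rw [List.all_eq_true] at hall ⊢
        intro b hb
        rcases List.mem_map.mp hb with ⟨x, hx, rfl⟩
        exact hall x hx
      have hall' : (t.map (fun item => item.length)).all (fun x => x == h.length) = true := by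
        rw [List.all_eq_true]
        intro b hb
        rcases List.mem_map.mp hb with ⟨x, hx, rfl⟩
        exact (List.all_eq_true.mp hall) x hx
      simp [hall, hset, List.any_cons]
    · have hset : ¬ ((PySem.Set.ofList (h.length :: t.map (fun item => item.length))).length = 1) := by
        rw [set_len_one]
        intro hc
        apply hall
        rw [List.all_eq_true] at hc ⊢
        intro x hx
        exact hc x.length (List.mem_map.mpr ⟨x, hx, rfl⟩)
      simp [hall, hset]

lemma main_eq (data : List (String × List (List Int))) :
    check_json_integrity data = check_json_integrity_alt data := by
  induction data with
  | nil => rfl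
  | cons kv rest ih =>
    obtain ⟨key, value⟩ := kv
    by_cases hk : key = ".i18n_tools"
    · simp [check_json_integrity, check_json_integrity_alt, hk, ih]
    · have hk' : (key == ".i18n_tools") = false := by simpa using hk
      rw [check_json_integrity, check_json_integrity_alt, hk']
      simp only [hk, if_neg, ite_not, not_false_eq_true]
      rw [← value_eq value]
      by_cases hany : (value.any (fun item => decide (item.length > 0))) = true
      · by_cases hset : (PySem.Set.ofList (value.map (fun item => item.length))).length = 1
        · simp [hany, hset, ih]
        · simp [hany, hset]
      · simp [hany]

-- ===== VERDICT (by name: the statement is the Claim_ definition above) =====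
theorem check_json_integrity_spec : Claim_equal_check_json_integrity := by
  intro data _
  unfold Spec_check_json_integrity
  exact main_eq data
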